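-- pv_equiv track=rewrite | github.com/taylorw2/Algo-problems | Portfolio-Of-Work/F# and python/Fun with Exceptions/hw3.py | genFinalDates
-- ===== SOURCE A (Python) =====
-- def leapYear(year):
-- 	if(((year % 4 == 0) and (year%100!=0))
-- 		or(year%400 == 0)):
-- 		return True
-- 	else:
-- 		return False
--
-- def genFinalDates(year):
-- 	l = []
-- 	i = 0
-- 	thirtyOne = [1,3,5,7,8,10,12]
-- 	thirty = [4,6,9,11]
-- 	feb = [2]
-- 	if(type(year) == int):
-- 		for index in range(1,13):
-- 			if (index in thirtyOne):
-- 				l.append((index,31,year))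
-- 			elif(index in thirty):
-- 				l.append((index,30,year))
-- 			else:
-- 				if(leapYear(year)):
-- 					l.append((index,29,year))
-- 				else:
-- 					l.append((index,28,year))
-- 		while(i < len(l)):
-- 			yield l[i]
-- 			i = i + 1
-- ===== SOURCE B (Python) =====
-- def leapYear(year):
-- 	if(((year % 4 == 0) and (year%100!=0))
-- 		or(year%400 == 0)):
-- 		return True
-- 	else:
-- 		return False
--
-- def genFinalDates(year):
-- 	if type(year) == int:
-- 		days = [31, 28, 31, 30, 31, 30, 31, 31, 30, 31, 30, 31]
-- 		if leapYear(year):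
-- 			days[1] = 29
-- 		for m in range(1, 13):
-- 			yield (m, days[m - 1], year)
-- ===== Notes on version B (the rewrite author's own statement) =====
-- stated objective: simpler
-- what changed: Replaces the per-month three-way membership-test branching and the build-list-then-while-yield two-pass with a fixed month-length table (patched for leap February) and a single direct yield loop.
import Mathlib
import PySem

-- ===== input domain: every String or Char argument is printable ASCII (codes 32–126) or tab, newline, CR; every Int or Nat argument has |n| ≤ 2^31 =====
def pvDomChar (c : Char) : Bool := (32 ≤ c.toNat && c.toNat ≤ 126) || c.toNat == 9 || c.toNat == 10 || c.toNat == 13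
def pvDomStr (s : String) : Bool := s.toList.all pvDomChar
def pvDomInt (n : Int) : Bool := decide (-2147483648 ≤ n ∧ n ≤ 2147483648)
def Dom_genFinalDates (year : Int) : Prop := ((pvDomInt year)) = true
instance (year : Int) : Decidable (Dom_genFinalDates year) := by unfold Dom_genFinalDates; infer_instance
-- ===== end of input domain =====

-- B replaces A's per-month membership-test branching and build-then-while-yield two-pass with a
-- fixed month-length table (patched for leap February) and one direct pass; objective: simpler.
-- Both ports take year : Int, so Python's `type(year) == int` guard is always true here.

-- ===== PORT A =====
-- shared helper: identical `leapYear` source in both Python files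
def leapYear (year : Int) : Bool :=
  if ((PySem.Int.mod year 4 == 0 && !(PySem.Int.mod year 100 == 0))
      || PySem.Int.mod year 400 == 0) then true else false

-- A's trailing `while i < len(l): yield l[i]; i += 1`, step for step (i starts at 0, stays ≥ 0)
def pvWhileYield (l : List (Int × Int × Int)) (i : Nat) : List (Int × Int × Int) :=
  if h : i < l.length then l[i] :: pvWhileYield l (i + 1) else []
termination_by l.length - i

def genFinalDates (year : Int) : List (Int × Int × Int) :=
  let thirtyOne : List Int := [1, 3, 5, 7, 8, 10, 12]
  let thirty : List Int := [4, 6, 9, 11]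
  let l : List (Int × Int × Int) :=
    (PySem.List.pyRange 1 13 1).foldl (fun l index =>
      if thirtyOne.contains index then l ++ [(index, 31, year)]
      else if thirty.contains index then l ++ [(index, 30, year)]
      else if leapYear year then l ++ [(index, 29, year)]
      else l ++ [(index, 28, year)]) []
  pvWhileYield l 0

-- ===== PORT B =====
def genFinalDates_alt (year : Int) : List (Int × Int × Int) :=
  let days : List Int := [31, 28, 31, 30, 31, 30, 31, 31, 30, 31, 30, 31]
  let days := if leapYear year then days.set 1 29 else days
  (PySem.List.pyRange 1 13 1).map (fun m => (m, PySem.List.pyGetD days (m - 1) 0, year))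

-- ===== PRECONDITION & SPEC =====
def Spec_genFinalDates (year : Int) (out : List (Int × Int × Int)) : Prop := out = genFinalDates_alt year
instance (year : Int) (out : List (Int × Int × Int)) : Decidable (Spec_genFinalDates year out) := by unfold Spec_genFinalDates; infer_instance

-- ===== CLAIM (what is proved, stated in full; the proofs are below) =====
def Claim_equal_genFinalDates : Prop := ∀ (year : Int), Dom_genFinalDates year → Spec_genFinalDates year (genFinalDates year)

-- ===== LEMMAS AND PROOFS =====
theorem pvWhileYield_eq_drop (l : List (Int × Int × Int)) (i : Nat) :
    pvWhileYield l i = l.drop i := by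
  rw [pvWhileYield]
  split
  · next h =>
    rw [pvWhileYield_eq_drop l (i + 1)]
    exact List.getElem_cons_drop h
  · next h =>
    exact (List.drop_eq_nil_of_le (by omega)).symm
termination_by l.length - i

theorem pvRange_1_13 : PySem.List.pyRange 1 13 1 = [1,2,3,4,5,6,7,8,9,10,11,12] := by decide

-- ===== VERDICT (by name: the statement is the Claim_ definition above) =====
theorem genFinalDates_spec : Claim_equal_genFinalDates := by
  intro year _
  unfold Spec_genFinalDates genFinalDates genFinalDates_alt
  rw [pvRange_1_13, pvWhileYield_eq_drop]
  by_cases h : leapYear year = true <;>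
    simp [h, List.foldl, List.map, PySem.List.pyGetD]
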